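-- pv_equiv track=rewrite | github.com/The-Clowder-Project/the-clowder-project | scripts/preprocess.py | remove_index
-- ===== SOURCE A (Python) =====
-- def remove_index(line):
--     def remove_index_with_parser(line):
--         i = 0
--         output = []
--         while i < len(line):
--             # Correcting the condition to look for a single backslash
--             if line[i:i+7] == r'\index[':
--                 depth_square = 0
--                 depth_brace = 0
--                 inside_square = True
--                 inside_brace = False
--                 j = i
--                 while j < len(line):
--                     if inside_square:
--                         if line[j] == '[':
--                             depth_square += 1
--                         elif line[j] == ']':
--                             depth_square -= 1
--                             if depth_square == 0:
--                                 inside_square = False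
--                                 inside_brace = True
--                     elif inside_brace:
--                         if line[j] == '{':
--                             depth_brace += 1
--                         elif line[j] == '}':
--                             depth_brace -= 1
--                             if depth_brace == 0:
--                                 break
--                     j += 1
--                 # Append the part of the line before the \index command and skip to the position after the command
--                 output.append(line[i:j+1].replace(line[i:j+1], ''))
--                 i = j + 1
--             else:
--                 output.append(line[i])
--                 i += 1
--         return ''.join(output)
--     return remove_index_with_parser(line)
-- ===== SOURCE B (Python) =====
-- def remove_index(line):
--     # Single flat pass: explicit state machine (0=outside, 1=in [..], 2=in {..}).
--     out = []
--     state = 0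
--     depth = 0
--     n = len(line)
--     i = 0
--     while i < n:
--         c = line[i]
--         if state == 0:
--             if line[i:i+7] == r'\index[':
--                 state = 1
--                 depth = 0
--             else:
--                 out.append(c)
--         elif state == 1:
--             if c == '[':
--                 depth += 1
--             elif c == ']':
--                 depth -= 1
--                 if depth == 0:
--                     state = 2
--         else:
--             if c == '{':
--                 depth += 1
--             elif c == '}':
--                 depth -= 1
--                 if depth == 0:
--                     state = 0
--         i += 1
--     return ''.join(out)
-- ===== Notes on version B (the rewrite author's own statement) =====
-- stated objective: simpler
-- what changed: A's outer scan with a nested rescanning while-loop (plus a vacuous append of slice.replace(slice, empty), which is always the empty string) is replaced by one flat pass over the characters with an explicit three-state machine (outside / in-square-brackets / in-braces) and a single depth counter.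
import Mathlib
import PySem

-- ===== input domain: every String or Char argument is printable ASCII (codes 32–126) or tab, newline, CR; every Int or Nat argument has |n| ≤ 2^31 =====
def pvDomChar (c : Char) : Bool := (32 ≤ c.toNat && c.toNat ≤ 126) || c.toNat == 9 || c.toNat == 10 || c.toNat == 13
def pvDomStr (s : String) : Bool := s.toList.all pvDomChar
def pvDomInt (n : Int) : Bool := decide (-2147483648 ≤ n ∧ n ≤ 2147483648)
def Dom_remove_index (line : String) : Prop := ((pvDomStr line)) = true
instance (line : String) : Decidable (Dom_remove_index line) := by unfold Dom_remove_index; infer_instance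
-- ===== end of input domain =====

-- B replaces A's nested scan-and-skip loops by one flat character pass with an explicit
-- state machine (outside / in-square / in-brace) and a depth counter (objective: simpler).


-- the literal r'\index[' as a list of chars
def pvPat : List Char := ['\\', 'i', 'n', 'd', 'e', 'x', '[']

-- ===== PORT A =====
-- inner while loop of A: scanning from index j with depth_square ds, depth_brace db,
-- flags inside_square / inside_brace; returns the index j at which the loop stops
-- (break, or cs.length when it runs off the end). The fuel argument only makes the
-- loop total: any fuel ≥ cs.length - j gives exactly the Python loop's stopping index.
def pvInnerA (cs : List Char) : Nat → Nat → Int → Int → Bool → Bool → Nat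
  | 0, j, _, _, _, _ => j
  | fuel+1, j, ds, db, insq, inbr =>
    if h : j < cs.length then
      let c := cs[j]
      if insq then
        if c = '[' then pvInnerA cs fuel (j+1) (ds+1) db insq inbr
        else if c = ']' then
          if ds - 1 = 0 then pvInnerA cs fuel (j+1) (ds-1) db false true
          else pvInnerA cs fuel (j+1) (ds-1) db insq inbr
        else pvInnerA cs fuel (j+1) ds db insq inbr
      else if inbr then
        if c = '{' then pvInnerA cs fuel (j+1) ds (db+1) insq inbr
        else if c = '}' then
          if db - 1 = 0 then j   -- break
          else pvInnerA cs fuel (j+1) ds (db-1) insq inbr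
        else pvInnerA cs fuel (j+1) ds db insq inbr
      else pvInnerA cs fuel (j+1) ds db insq inbr
    else j

-- outer while loop of A: `acc` is the accumulated list `output` of appended pieces
-- (each a list of chars); line[i:j+1].replace(line[i:j+1], empty) always yields the empty string.
-- The fuel argument only makes the loop total: i strictly increases each iteration,
-- so any fuel ≥ cs.length - i gives exactly the Python loop's result.
def pvOuterA (cs : List Char) : Nat → Nat → List (List Char) → List (List Char)
  | 0, _, acc => acc
  | fuel+1, i, acc =>
    if h : i < cs.length then
      if (cs.drop i).take 7 = pvPat then
        let j := pvInnerA cs cs.length i 0 0 true false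
        pvOuterA cs fuel (j+1) (acc ++ [[]])
      else
        pvOuterA cs fuel (i+1) (acc ++ [[cs[i]]])
    else acc

def remove_index (line : String) : String :=
  String.ofList (pvOuterA line.toList line.toList.length 0 []).flatten   -- the join of output

-- ===== PORT B =====
-- flat state machine over the characters: state 0 = outside, 1 = inside [..], 2 = inside {..}
def pvAltGo : List Char → Nat → Int → List Char
  | [], _, _ => []
  | c :: rest, state, depth =>
    if state = 0 then
      if (c :: rest).take 7 = pvPat then pvAltGo rest 1 0
      else c :: pvAltGo rest 0 depth
    else if state = 1 then
      if c = '[' then pvAltGo rest 1 (depth+1)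
      else if c = ']' then
        if depth - 1 = 0 then pvAltGo rest 2 (depth-1) else pvAltGo rest 1 (depth-1)
      else pvAltGo rest 1 depth
    else
      if c = '{' then pvAltGo rest 2 (depth+1)
      else if c = '}' then
        if depth - 1 = 0 then pvAltGo rest 0 (depth-1) else pvAltGo rest 2 (depth-1)
      else pvAltGo rest 2 depth

def remove_index_alt (line : String) : String :=
  String.ofList (pvAltGo line.toList 0 0)

-- ===== PRECONDITION & SPEC =====
def Spec_remove_index (line : String) (out : String) : Prop := out = remove_index_alt line
instance (line : String) (out : String) : Decidable (Spec_remove_index line out) := by unfold Spec_remove_index; infer_instance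

-- ===== CLAIM (what is proved, stated in full; the proofs are below) =====
def Claim_equal_remove_index : Prop := ∀ (line : String), Dom_remove_index line → Spec_remove_index line (remove_index line)

-- ===== LEMMAS AND PROOFS =====

-- the inner loop never moves backwards
theorem pvInnerA_ge (cs : List Char) (fuel : Nat) :
    ∀ (j : Nat) (ds db : Int) (insq inbr : Bool), j ≤ pvInnerA cs fuel j ds db insq inbr := by
  induction fuel with
  | zero => intro j ds db insq inbr; simp [pvInnerA]
  | succ f ih =>
      intro j ds db insq inbr
      simp only [pvInnerA]
      split_ifs <;> first
        | omega
        | exact Nat.le_trans (Nat.le_succ j) (ih (j+1) _ _ _ _)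

theorem pvDropCons {cs : List Char} {j : Nat} (h : j < cs.length) :
    cs.drop j = cs[j] :: cs.drop (j+1) := List.drop_eq_getElem_cons h

-- brace phase: B's state-2 run from position j = B restarted in state 0 after A's break index
theorem pvBraceAux (cs : List Char) (fuel : Nat) :
    ∀ (j : Nat) (db : Int), cs.length - j ≤ fuel →
      pvAltGo (cs.drop j) 2 db = pvAltGo (cs.drop (pvInnerA cs fuel j 0 db false true + 1)) 0 0 := by
  induction fuel with
  | zero =>
      intro j db h
      have h1 : cs.length ≤ j := by omega
      rw [List.drop_eq_nil_of_le h1, List.drop_eq_nil_of_le (by simp [pvInnerA]; omega)]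
      simp [pvAltGo]
  | succ f ih =>
      intro j db h
      by_cases hj : j < cs.length
      · rw [pvDropCons hj]
        simp only [pvInnerA, hj, dif_pos]
        by_cases h1 : cs[j] = '{'
        · simp only [pvAltGo, h1, reduceIte]
          exact ih (j+1) (db+1) (by omega)
        · by_cases h2 : cs[j] = '}'
          · by_cases h3 : db - 1 = 0
            · simp [pvAltGo, h2, h3]
            · simp only [pvAltGo, h2, h3, reduceIte, if_pos]
              exact ih (j+1) (db-1) (by omega)
          · simp only [pvAltGo, h1, h2, reduceIte]
            exact ih (j+1) db (by omega)
      · have h1 : cs.length ≤ j := by omega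
        rw [List.drop_eq_nil_of_le h1,
          List.drop_eq_nil_of_le (by simp only [pvInnerA, hj, dif_neg, not_false_iff]; omega)]
        simp [pvAltGo]

-- square phase: B's state-1 run from position j = B restarted in state 0 after A's break index
theorem pvSquareAux (cs : List Char) (fuel : Nat) :
    ∀ (j : Nat) (ds : Int), cs.length - j ≤ fuel →
      pvAltGo (cs.drop j) 1 ds = pvAltGo (cs.drop (pvInnerA cs fuel j ds 0 true false + 1)) 0 0 := by
  induction fuel with
  | zero =>
      intro j ds h
      have h1 : cs.length ≤ j := by omega
      rw [List.drop_eq_nil_of_le h1, List.drop_eq_nil_of_le (by simp [pvInnerA]; omega)]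
      simp [pvAltGo]
  | succ f ih =>
      intro j ds h
      by_cases hj : j < cs.length
      · rw [pvDropCons hj]
        simp only [pvInnerA, hj, dif_pos]
        by_cases h1 : cs[j] = '['
        · simp only [pvAltGo, h1, reduceIte]
          exact ih (j+1) (ds+1) (by omega)
        · by_cases h2 : cs[j] = ']'
          · by_cases h3 : ds - 1 = 0
            · have hds : ds = 1 := by omega
              subst hds
              simp only [pvAltGo, h1, h2, reduceIte]
              exact pvBraceAux cs f (j+1) 0 (by omega)
            · simp only [pvAltGo, h1, h2, h3, reduceIte, if_pos]
              exact ih (j+1) (ds-1) (by omega)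
          · simp only [pvAltGo, h1, h2, reduceIte]
            exact ih (j+1) ds (by omega)
      · have h1 : cs.length ≤ j := by omega
        rw [List.drop_eq_nil_of_le h1,
          List.drop_eq_nil_of_le (by simp only [pvInnerA, hj, dif_neg, not_false_iff]; omega)]
        simp [pvAltGo]

-- main invariant: A's outer loop from index i equals acc ++ B's state-0 run on the suffix
theorem pvMainAux (cs : List Char) (fuel : Nat) :
    ∀ (i : Nat) (acc : List (List Char)), cs.length - i ≤ fuel →
      (pvOuterA cs fuel i acc).flatten = acc.flatten ++ pvAltGo (cs.drop i) 0 0 := by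
  induction fuel with
  | zero =>
      intro i acc h
      rw [List.drop_eq_nil_of_le (by omega)]
      simp [pvOuterA, pvAltGo]
  | succ f ih =>
      intro i acc h
      by_cases hi : i < cs.length
      · simp only [pvOuterA, hi, dif_pos]
        by_cases hp : (cs.drop i).take 7 = pvPat
        · simp only [hp, reduceIte]
          have hj := pvInnerA_ge cs cs.length i 0 0 true false
          rw [ih (pvInnerA cs cs.length i 0 0 true false + 1) (acc ++ [[]]) (by omega)]
          -- the head of the matched pattern is '\'
          have hc : cs[i] = '\\' := by
            rw [pvDropCons hi] at hp
            simp only [List.take_succ_cons, pvPat, List.cons.injEq] at hp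
            exact hp.1
          -- A's inner loop merely steps over the leading '\'
          have hstep : pvInnerA cs cs.length i 0 0 true false
              = pvInnerA cs (cs.length - 1) (i+1) 0 0 true false := by
            obtain ⟨m, hm⟩ : ∃ m, cs.length = m + 1 := ⟨cs.length - 1, by omega⟩
            rw [hm]
            simp only [pvInnerA, hi, hm ▸ hi, dif_pos, hc,
              show ('\\':Char) ≠ '[' from by decide, show ('\\':Char) ≠ ']' from by decide,
              reduceIte, if_neg, Nat.add_sub_cancel]
          -- B consumes the same suffix in state 1 from i+1
          have hb : pvAltGo (cs.drop i) 0 0 = pvAltGo (cs.drop (i+1)) 1 0 := by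
            rw [pvDropCons hi]
            rw [pvDropCons hi] at hp
            simp only [pvAltGo, reduceIte]
            rw [if_pos hp]
          rw [hb, pvSquareAux cs (cs.length - 1) (i+1) 0 (by omega), hstep]
          simp
        · simp only [hp, reduceIte]
          rw [ih (i+1) (acc ++ [[cs[i]]]) (by omega)]
          have hb : pvAltGo (cs.drop i) 0 0 = cs[i] :: pvAltGo (cs.drop (i+1)) 0 0 := by
            rw [pvDropCons hi]
            rw [pvDropCons hi] at hp
            simp only [pvAltGo, reduceIte]
            rw [if_neg hp]
          rw [hb]
          simp
      · rw [List.drop_eq_nil_of_le (by omega)]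
        simp [pvOuterA, hi, pvAltGo]

-- ===== VERDICT (by name: the statement is the Claim_ definition above) =====
theorem remove_index_spec : Claim_equal_remove_index := by
  intro line _
  unfold Spec_remove_index remove_index remove_index_alt
  have := pvMainAux line.toList line.toList.length 0 [] (by omega)
  simpa using congrArg String.ofList this
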